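-- pv_equiv track=rewrite | github.com/mikiSpoko200/gl-reference-processor | preprocessor.py | process_enumeration_line
-- ===== SOURCE A (Python) =====
-- def process_enumeration_line(line: str) -> str:
--     result = []
--     variants = []
--     entries = line.split(",")
--     look_for_matching_brace = False
--     base = ""
--     for entry in entries:
--         trimmed = entry.strip()
--         if "{" in trimmed:
--             if "_" in trimmed:
--                 pos = trimmed.find("_")
--                 base = trimmed[:pos+1]
--             pos = trimmed.find("{")
--             trimmed = trimmed[pos+1:]
--             look_for_matching_brace = True
--         if not look_for_matching_brace:
--             result.append(entry)
--         else:
--             if "}" in trimmed: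
--                 if "_" in trimmed:
--                     pos = trimmed.find("_")
--                     base = trimmed[pos:]
--                 look_for_matching_brace = False
--                 pos = trimmed.find("}")
--                 trimmed = trimmed[:pos]
--                 variants.append(trimmed)
--                 result.extend(
--                     base + variant if base.endswith("_") else variant + base
--                     for variant in variants
--                 )
--             else:
--                 variants.append(trimmed)
--     return ", ".join(result)
-- ===== SOURCE B (Python) =====
-- def process_enumeration_line(line: str) -> str:
--     # Index-driven nested-loop rewrite: an outer loop copies plain entries and,
--     # on an opening brace, an inner loop consumes the whole brace group.
--     entries = line.split(",")
--     out = []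
--     variants = []
--     base = ""
--     i = 0
--     n = len(entries)
--     while i < n:
--         e = entries[i]
--         i += 1
--         t = e.strip()
--         if "{" not in t:
--             out.append(e)
--             continue
--         if "_" in t:
--             base = t[:t.find("_") + 1]
--         t = t[t.find("{") + 1:]
--         while "}" not in t:
--             variants.append(t)
--             if i == n:
--                 return ", ".join(out)
--             t = entries[i].strip()
--             i += 1
--             if "{" in t:
--                 if "_" in t:
--                     base = t[:t.find("_") + 1]
--                 t = t[t.find("{") + 1:]
--         if "_" in t:
--             base = t[t.find("_"):]
--         variants.append(t[:t.find("}")])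
--         out.extend(base + v if base.endswith("_") else v + base for v in variants)
--     return ", ".join(out)
-- ===== Notes on version B (the rewrite author's own statement) =====
-- stated objective: alternative
-- what changed: Replaces A's single-pass state machine (a look_for_matching_brace flag threaded through one loop over all entries) with an index-driven outer loop that copies plain entries and, on an opening brace, a dedicated inner loop that consumes the whole brace group and splices in its expansion.
import Mathlib
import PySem

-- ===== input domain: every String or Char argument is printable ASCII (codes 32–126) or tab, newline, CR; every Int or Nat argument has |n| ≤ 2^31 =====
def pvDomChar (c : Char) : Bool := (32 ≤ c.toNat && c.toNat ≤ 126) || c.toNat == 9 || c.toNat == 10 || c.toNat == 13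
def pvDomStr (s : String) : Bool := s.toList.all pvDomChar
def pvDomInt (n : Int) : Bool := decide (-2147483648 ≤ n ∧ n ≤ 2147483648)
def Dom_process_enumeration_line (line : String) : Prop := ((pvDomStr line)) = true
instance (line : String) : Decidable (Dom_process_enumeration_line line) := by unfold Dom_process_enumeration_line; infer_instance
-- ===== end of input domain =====

-- B is an index-driven nested-loop decomposition of A's flag-driven state machine; objective: alternative (same cost).

-- ===== PORT A =====
-- state = (result, variants, look_for_matching_brace, base), exactly A's loop variables
def pvAStep (st : List String × List String × Bool × String) (entry : String) :
    List String × List String × Bool × String :=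
  let result := st.1; let variants := st.2.1; let look := st.2.2.1; let base := st.2.2.2
  let trimmed := PySem.Str.strip entry
  -- if "{" in trimmed: (maybe) reset base, cut after "{", set the flag
  let trimmed' := if PySem.Str.isIn "{" trimmed then
      PySem.Str.slice trimmed (some (PySem.Str.find trimmed "{" + 1)) none else trimmed
  let base' := if PySem.Str.isIn "{" trimmed && PySem.Str.isIn "_" trimmed then
      PySem.Str.slice trimmed none (some (PySem.Str.find trimmed "_" + 1)) else base
  let look' := if PySem.Str.isIn "{" trimmed then true else look
  if !look' then (result ++ [entry], variants, look', base')
  else if PySem.Str.isIn "}" trimmed' then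
    let base'' := if PySem.Str.isIn "_" trimmed' then
        PySem.Str.slice trimmed' (some (PySem.Str.find trimmed' "_")) none else base'
    let piece := PySem.Str.slice trimmed' none (some (PySem.Str.find trimmed' "}"))
    let variants' := variants ++ [piece]
    (result ++ variants'.map (fun v =>
        if PySem.Str.endswith base'' "_" then base'' ++ v else v ++ base''),
     variants', false, base'')
  else (result, variants ++ [trimmed'], look', base')

def process_enumeration_line (line : String) : String :=
  let entries := (PySem.Str.split? line ",").getD []
  let st := entries.foldl pvAStep ([], [], false, "")
  PySem.Str.join ", " st.1

-- ===== PORT B =====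
-- outer loop (copying plain entries), inner loop (consuming one brace group), and the
-- close-or-continue test on the current fragment, as three mutually recursive functions
mutual
  -- outer loop: copy entries until one opens a brace group
  def pvGo (es : List String) (base : String) (variants : List String) : List String :=
    match es with
    | [] => []
    | e :: rest =>
      let t := PySem.Str.strip e
      if PySem.Str.isIn "{" t then
        let base' := if PySem.Str.isIn "_" t then
            PySem.Str.slice t none (some (PySem.Str.find t "_" + 1)) else base
        pvStep (PySem.Str.slice t (some (PySem.Str.find t "{" + 1)) none) rest base' variants
      else e :: pvGo rest base variants
  termination_by (es.length, 1)

  -- inner loop: fetch the next entry of an open group (re-open quirk included)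
  def pvGrp (es : List String) (base : String) (variants : List String) : List String :=
    match es with
    | [] => []
    | e :: rest =>
      let t := PySem.Str.strip e
      if PySem.Str.isIn "{" t then
        let base' := if PySem.Str.isIn "_" t then
            PySem.Str.slice t none (some (PySem.Str.find t "_" + 1)) else base
        pvStep (PySem.Str.slice t (some (PySem.Str.find t "{" + 1)) none) rest base' variants
      else pvStep t rest base variants
  termination_by (es.length, 1)

  -- close test: flush the group on "}", otherwise keep collecting
  def pvStep (t : String) (rest : List String) (base : String) (variants : List String) : List String :=
    if PySem.Str.isIn "}" t then
      let base' := if PySem.Str.isIn "_" t then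
          PySem.Str.slice t (some (PySem.Str.find t "_")) none else base
      let v := variants ++ [PySem.Str.slice t none (some (PySem.Str.find t "}"))]
      v.map (fun x => if PySem.Str.endswith base' "_" then base' ++ x else x ++ base')
        ++ pvGo rest base' v
    else pvGrp rest base (variants ++ [t])
  termination_by (rest.length + 1, 0)
end

def process_enumeration_line_alt (line : String) : String :=
  PySem.Str.join ", " (pvGo ((PySem.Str.split? line ",").getD []) "" [])

-- ===== PRECONDITION & SPEC =====
def Spec_process_enumeration_line (line : String) (out : String) : Prop := out = process_enumeration_line_alt line
instance (line : String) (out : String) : Decidable (Spec_process_enumeration_line line out) := by unfold Spec_process_enumeration_line; infer_instance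

-- ===== CLAIM (what is proved, stated in full; the proofs are below) =====
def Claim_equal_process_enumeration_line : Prop := ∀ (line : String), Dom_process_enumeration_line line → Spec_process_enumeration_line line (process_enumeration_line line)

-- ===== LEMMAS AND PROOFS =====

-- A's fold from an arbitrary state equals the already-emitted result followed by
-- B's outer (flag = false) or inner (flag = true) loop on the remaining entries.
theorem pvA_eq_pvB (es : List String) : ∀ (res vars : List String) (look : Bool) (base : String),
    (es.foldl pvAStep (res, vars, look, base)).1
      = res ++ (if look then pvGrp es base vars else pvGo es base vars) := by
  induction es with
  | nil =>
    intro res vars look base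
    cases look <;> simp [pvGo, pvGrp]
  | cons e rest ih =>
    intro res vars look base
    rw [List.foldl_cons]
    by_cases hb : PySem.Chars.isIn ['{'] (PySem.Chars.strip e.toList) = true
    · by_cases hc : PySem.Chars.isIn ['}']
          (PySem.List.slice (PySem.Chars.strip e.toList)
            (some (PySem.Chars.find (PySem.Chars.strip e.toList) ['{'] + 1)) none) = true <;>
        cases look <;>
        simp [pvAStep, pvGo, pvGrp, pvStep, hb, hc, ih, List.append_assoc]
    · by_cases hc : PySem.Chars.isIn ['}'] (PySem.Chars.strip e.toList) = true <;>
        cases look <;>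
        simp [pvAStep, pvGo, pvGrp, pvStep, hb, hc, ih, List.append_assoc]

-- ===== VERDICT (by name: the statement is the Claim_ definition above) =====
theorem process_enumeration_line_spec : Claim_equal_process_enumeration_line := by
  intro line _
  show process_enumeration_line line = process_enumeration_line_alt line
  unfold process_enumeration_line process_enumeration_line_alt
  simp only [pvA_eq_pvB, if_neg Bool.false_ne_true, List.nil_append]
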